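-- pv_equiv track=rewrite | github.com/thailore/RandomCodes | Interviews-Challenges/botasanaSmartAssigning.py | tasksTypes
-- ===== SOURCE A (Python) =====
-- def tasksTypes(deadline, day):
--     labels = [0,0,0]
--     for i in range(len(deadline)):
--         if deadline[i]<= day:
--             labels[0]+=1
--         elif deadline[i] in range(day+1, day+8):
--             labels[1]+=1
--         else:
--             labels[2]+=1
--     return labels
-- ===== SOURCE B (Python) =====
-- def tasksTypes(deadline, day):
--     c0 = sum(1 for d in deadline if d <= day)
--     c1 = sum(1 for d in deadline if d in range(day + 1, day + 8))
--     return [c0, c1, len(deadline) - c0 - c1]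
-- ===== Notes on version B (the rewrite author's own statement) =====
-- stated objective: simpler
-- what changed: Replaces the single stateful if/elif/else accumulation loop with two independent count aggregations (c0, c1) and derives the third bucket arithmetically as len - c0 - c1, relying on disjointness of the first two predicates.
import Mathlib
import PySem

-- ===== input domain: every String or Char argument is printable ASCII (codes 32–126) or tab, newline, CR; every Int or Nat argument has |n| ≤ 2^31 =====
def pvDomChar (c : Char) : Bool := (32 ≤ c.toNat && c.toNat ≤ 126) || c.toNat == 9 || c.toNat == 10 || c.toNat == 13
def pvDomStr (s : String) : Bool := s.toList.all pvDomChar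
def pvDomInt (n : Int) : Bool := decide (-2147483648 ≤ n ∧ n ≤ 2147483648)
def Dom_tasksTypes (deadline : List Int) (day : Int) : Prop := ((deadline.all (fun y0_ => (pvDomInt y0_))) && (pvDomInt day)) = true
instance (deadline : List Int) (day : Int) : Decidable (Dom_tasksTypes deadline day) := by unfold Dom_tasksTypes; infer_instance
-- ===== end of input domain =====

-- ===== PORT A =====
-- B: two independent counts plus arithmetic for the third bucket, instead of A's single if/elif/else loop.
-- A: loop over deadline accumulating a triple (labels[0],labels[1],labels[2]); branches in A's order.
def tasksTypes (deadline : List Int) (day : Int) : List Int :=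
  let labels := deadline.foldl
    (fun (l : Int × Int × Int) d =>
      if d ≤ day then (l.1 + 1, l.2.1, l.2.2)
      else if day + 1 ≤ d ∧ d < day + 8 then (l.1, l.2.1 + 1, l.2.2)
      else (l.1, l.2.1, l.2.2 + 1))
    (0, 0, 0)
  [labels.1, labels.2.1, labels.2.2]

-- ===== PORT B =====
def tasksTypes_alt (deadline : List Int) (day : Int) : List Int :=
  let c0 : Int := deadline.countP (fun d => d ≤ day)
  let c1 : Int := deadline.countP (fun d => day + 1 ≤ d ∧ d < day + 8)
  [c0, c1, (deadline.length : Int) - c0 - c1]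

-- ===== PRECONDITION & SPEC =====
def Spec_tasksTypes (deadline : List Int) (day : Int) (out : List Int) : Prop := out = tasksTypes_alt deadline day
instance (deadline : List Int) (day : Int) (out : List Int) : Decidable (Spec_tasksTypes deadline day out) := by unfold Spec_tasksTypes; infer_instance

-- ===== CLAIM (what is proved, stated in full; the proofs are below) =====
def Claim_equal_tasksTypes : Prop := ∀ (deadline : List Int) (day : Int), Dom_tasksTypes deadline day → Spec_tasksTypes deadline day (tasksTypes deadline day)

-- ===== LEMMAS AND PROOFS =====

-- ===== VERDICT (by name: the statement is the Claim_ definition above) =====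
lemma tasksTypes_loop (day : Int) (l : List Int) (a b c : Int) :
    l.foldl
      (fun (t : Int × Int × Int) d =>
        if d ≤ day then (t.1 + 1, t.2.1, t.2.2)
        else if day + 1 ≤ d ∧ d < day + 8 then (t.1, t.2.1 + 1, t.2.2)
        else (t.1, t.2.1, t.2.2 + 1))
      (a, b, c)
    = (a + l.countP (fun d => d ≤ day),
       b + l.countP (fun d => day + 1 ≤ d ∧ d < day + 8),
       c + ((l.length : Int)
            - l.countP (fun d => d ≤ day)
            - l.countP (fun d => day + 1 ≤ d ∧ d < day + 8))) := by
  induction l generalizing a b c with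
  | nil => simp
  | cons x xs ih =>
    simp only [List.foldl_cons, List.countP_cons, List.length_cons]
    split_ifs with h0 h1 <;>
      rw [ih] <;>
      simp only [Prod.mk.injEq] <;>
      refine ⟨?_, ?_, ?_⟩ <;>
      · push_cast
        simp only [decide_eq_true_eq] at *
        omega

theorem tasksTypes_spec : Claim_equal_tasksTypes := by
  intro deadline day _
  unfold Spec_tasksTypes tasksTypes tasksTypes_alt
  simp only [tasksTypes_loop]
  simp
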